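-- pv_equiv track=rewrite | github.com/casistack/mcp-atlassian | src/mcp_atlassian/content.py | validate_page_title
-- ===== SOURCE A (Python) =====
-- def validate_page_title(title: str) -> str:
--     """Validate and sanitize page title."""
--     if not title or not isinstance(title, str):
--         raise ValueError("Page title cannot be empty")
--
--     # Remove invalid characters
--     invalid_chars = ["/", "\\", ":", "*", "?", '"', "<", ">", "|", "[", "]"]
--     for char in invalid_chars:
--         title = title.replace(char, "-")
--
--     # Trim whitespace and limit length
--     title = title.strip()
--     if len(title) > 255:
--         title = title[:255].strip()
--
--     return title
-- ===== SOURCE B (Python) =====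
-- _INVALID = set('/\\:*?"<>|[]')
--
--
-- def validate_page_title(title: str) -> str:
--     """Validate and sanitize page title."""
--     if not title or not isinstance(title, str):
--         raise ValueError("Page title cannot be empty")
--
--     # Single fused pass with an accumulator: sanitize each char, skip leading
--     # whitespace, cap at 255 kept chars, and track the cut point for the
--     # trailing-whitespace trim -- instead of A's staged full-string passes.
--     out = []   # sanitized chars after the leading whitespace, at most 255
--     last = 0   # length of out up to (and including) its last non-space char
--     for ch in title:
--         if ch in _INVALID:
--             ch = "-"
--         if not out and ch.isspace():
--             continue            # leading whitespace never reaches the output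
--         if len(out) == 255:
--             break               # chars past index 255 of the stripped text are dropped anyway
--         out.append(ch)
--         if not ch.isspace():
--             last = len(out)
--     return "".join(out[:last])
-- ===== Notes on version B (the rewrite author's own statement) =====
-- stated objective: alternative
-- what changed: Replaces A's staged full-string passes (eleven sequential .replace() scans, then strip, then truncate-and-strip) with one fused left-to-right pass over the characters driven by an accumulator state machine that sanitizes, skips leading whitespace, caps the output at 255 chars, and records the trailing-whitespace cut point.
import Mathlib
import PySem

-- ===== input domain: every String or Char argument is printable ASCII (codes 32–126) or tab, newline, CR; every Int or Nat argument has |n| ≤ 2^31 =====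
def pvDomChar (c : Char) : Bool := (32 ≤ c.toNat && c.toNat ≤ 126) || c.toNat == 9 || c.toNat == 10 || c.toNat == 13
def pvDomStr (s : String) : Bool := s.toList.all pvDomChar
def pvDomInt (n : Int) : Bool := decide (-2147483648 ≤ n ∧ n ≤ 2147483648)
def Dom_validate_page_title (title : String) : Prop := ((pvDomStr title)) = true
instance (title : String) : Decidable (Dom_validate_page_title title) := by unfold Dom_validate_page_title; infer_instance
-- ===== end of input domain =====

-- B replaces A's staged full-string passes (eleven .replace() scans, strip, truncate-and-strip)
-- by ONE fused left-to-right pass with an accumulator state machine; objective: alternative.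

-- ===== PORT A =====
-- A's 'for char in invalid_chars: title = title.replace(char, "-")' is a foldl over the literal list.
def validate_page_title (title : String) : String :=
  let invalid_chars : List String := ["/", "\\", ":", "*", "?", "\"", "<", ">", "|", "[", "]"]
  let t := invalid_chars.foldl (fun t ch => PySem.Str.replace t ch "-") title
  let t := PySem.Str.strip t
  if 255 < PySem.Str.len t then PySem.Str.strip (PySem.Str.slice t none (some 255)) else t

-- ===== PORT B =====
-- Source B's '_INVALID' membership test
def pvInvalid (c : Char) : Bool :=
  c ∈ ['/', '\\', ':', '*', '?', '"', '<', '>', '|', '[', ']']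

-- Source B's loop body on state (out, last).  The 'break' once len(out) == 255 is ported as a
-- state-preserving step: exact, since from that point every remaining iteration leaves the
-- state unchanged (out never shrinks).
def pvStep (st : List Char × Nat) (c : Char) : List Char × Nat :=
  let ch := if pvInvalid c then '-' else c
  if st.1.isEmpty && PySem.Chars.isspace ch then st
  else if st.1.length == 255 then st
  else
    let out := st.1 ++ [ch]
    (out, if PySem.Chars.isspace ch then st.2 else out.length)

def validate_page_title_alt (title : String) : String :=
  let st := title.toList.foldl pvStep ([], 0)
  String.ofList (st.1.take st.2)

-- ===== PRECONDITION & SPEC =====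
-- Pre_ excludes only the empty string, on which A (and B) raise ValueError ("Page title cannot be empty").
def Pre_validate_page_title (title : String) : Prop := title ≠ ""
instance (title : String) : Decidable (Pre_validate_page_title title) := by unfold Pre_validate_page_title; infer_instance
def pvWitness_validate_page_title : String := "a"

def Spec_validate_page_title (title : String) (out : String) : Prop := out = validate_page_title_alt title
instance (title : String) (out : String) : Decidable (Spec_validate_page_title title out) := by unfold Spec_validate_page_title; infer_instance

-- ===== CLAIM (what is proved, stated in full; the proofs are below) =====
def Claim_equal_validate_page_title : Prop := ∀ (title : String), Dom_validate_page_title title → Pre_validate_page_title title → Spec_validate_page_title title (validate_page_title title)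

-- ===== LEMMAS AND PROOFS =====

-- the per-character substitution both sides realize
def pvF (c : Char) : Char := if pvInvalid c then '-' else c

-- Source B's loop body on an ALREADY substituted character
def pvG (st : List Char × Nat) (ch : Char) : List Char × Nat :=
  if st.1.isEmpty && PySem.Chars.isspace ch then st
  else if st.1.length == 255 then st
  else (st.1 ++ [ch], if PySem.Chars.isspace ch then st.2 else (st.1 ++ [ch]).length)

theorem pvStep_eq (st : List Char × Nat) (c : Char) : pvStep st c = pvG st (pvF c) := rfl

-- ---- A side: single-char .replace is a per-character map ----
theorem pv_go_single (c d : Char) :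
    ∀ (l : List Char) (fuel : Nat) (acc : List Char), l.length ≤ fuel →
      PySem.Chars.replace.go [c] [d] fuel l acc
        = acc.reverse ++ l.map (fun x => if x = c then d else x) := by
  intro l
  induction l with
  | nil => intro fuel acc _; cases fuel <;> simp [PySem.Chars.replace.go]
  | cons x t ih =>
    intro fuel acc h
    cases fuel with
    | zero => simp at h
    | succ f =>
      rw [PySem.Chars.replace.go]
      simp only [List.length_cons] at h
      by_cases hx : x = c
      · subst hx
        simp only [List.isPrefixOf, beq_self_eq_true, Bool.true_and, if_pos,
          List.length_singleton, List.drop_succ_cons, List.drop_zero, List.reverse_singleton]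
        rw [show [d] ++ acc = d :: acc from rfl, ih f (d :: acc) (by omega)]
        simp
      · simp only [List.isPrefixOf]
        rw [if_neg (by simp [Ne.symm hx])]
        rw [ih f (x :: acc) (by omega)]
        simp [hx]

theorem pv_replace_single (c d : Char) (s : List Char) :
    PySem.Chars.replace s [c] [d] = s.map (fun x => if x = c then d else x) := by
  rw [PySem.Chars.replace]
  simp [pv_go_single c d s s.length [] (le_refl _)]

-- the composition of the eleven single-char substitutions is pvF, pointwise
theorem pv_point (c : Char) :
    ((fun x => if x = ']' then '-' else x) ∘
      (fun x => if x = '[' then '-' else x) ∘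
        (fun x => if x = '|' then '-' else x) ∘
          (fun x => if x = '>' then '-' else x) ∘
            (fun x => if x = '<' then '-' else x) ∘
              (fun x => if x = '"' then '-' else x) ∘
                (fun x => if x = '?' then '-' else x) ∘
                  (fun x => if x = '*' then '-' else x) ∘
                    (fun x => if x = ':' then '-' else x) ∘
                      (fun x => if x = '\\' then '-' else x) ∘ fun x => if x = '/' then '-' else x) c
      = pvF c := by
  by_cases h1 : c = '/';  · subst h1; rfl
  by_cases h2 : c = '\\'; · subst h2; rfl
  by_cases h3 : c = ':';  · subst h3; rfl
  by_cases h4 : c = '*';  · subst h4; rfl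
  by_cases h5 : c = '?';  · subst h5; rfl
  by_cases h6 : c = '"';  · subst h6; rfl
  by_cases h7 : c = '<';  · subst h7; rfl
  by_cases h8 : c = '>';  · subst h8; rfl
  by_cases h9 : c = '|';  · subst h9; rfl
  by_cases h10 : c = '['; · subst h10; rfl
  by_cases h11 : c = ']'; · subst h11; rfl
  simp [pvF, pvInvalid, h1, h2, h3, h4, h5, h6, h7, h8, h9, h10, h11]

theorem pv_fold_replace (title : String) :
    (["/", "\\", ":", "*", "?", "\"", "<", ">", "|", "[", "]"] : List String).foldl
        (fun t ch => PySem.Str.replace t ch "-") title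
      = String.ofList (title.toList.map pvF) := by
  apply String.toList_inj.mp
  simp only [List.foldl, PySem.Str.toList_replace, String.toList_ofList]
  simp only [show ("/" : String).toList = ['/'] from rfl,
    show ("\\" : String).toList = ['\\'] from rfl,
    show (":" : String).toList = [':'] from rfl,
    show ("*" : String).toList = ['*'] from rfl,
    show ("?" : String).toList = ['?'] from rfl,
    show ("\"" : String).toList = ['"'] from rfl,
    show ("<" : String).toList = ['<'] from rfl,
    show (">" : String).toList = ['>'] from rfl,
    show ("|" : String).toList = ['|'] from rfl,
    show ("[" : String).toList = ['['] from rfl,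
    show ("]" : String).toList = [']'] from rfl,
    show ("-" : String).toList = ['-'] from rfl,
    pv_replace_single, List.map_map]
  exact List.map_congr_left (fun c _ => pv_point c)

-- ---- rstrip toolkit ----
theorem pv_rstrip_append_ws (a w : List Char) (hw : ∀ c ∈ w, PySem.Chars.isspace c = true) :
    PySem.Chars.rstrip (a ++ w) = PySem.Chars.rstrip a := by
  unfold PySem.Chars.rstrip
  rw [List.reverse_append, List.dropWhile_append]
  have h : w.reverse.dropWhile PySem.Chars.isspace = [] :=
    List.dropWhile_eq_nil_iff.mpr (fun x hx => hw x (List.mem_reverse.mp hx))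
  simp [h]

theorem pv_rstrip_append_not_ws (a : List Char) (c : Char)
    (hc : PySem.Chars.isspace c = false) :
    PySem.Chars.rstrip (a ++ [c]) = a ++ [c] := by
  unfold PySem.Chars.rstrip
  simp [hc]

theorem pv_rstrip_decomp (x : List Char) :
    PySem.Chars.rstrip x ++ (x.reverse.takeWhile PySem.Chars.isspace).reverse = x := by
  unfold PySem.Chars.rstrip
  rw [← List.reverse_append, List.takeWhile_append_dropWhile, List.reverse_reverse]

theorem pv_take_rstrip_length (x : List Char) :
    x.take (PySem.Chars.rstrip x).length = PySem.Chars.rstrip x := by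
  have h := List.take_left (l₁ := PySem.Chars.rstrip x)
    (l₂ := (x.reverse.takeWhile PySem.Chars.isspace).reverse)
  rw [pv_rstrip_decomp x] at h
  exact h

theorem pv_rstrip_idem (x : List Char) :
    PySem.Chars.rstrip (PySem.Chars.rstrip x) = PySem.Chars.rstrip x := by
  unfold PySem.Chars.rstrip
  rw [List.reverse_reverse]
  congr 1
  induction x.reverse with
  | nil => rfl
  | cons a t ih =>
    by_cases ha : PySem.Chars.isspace a = true
    · simpa [List.dropWhile_cons, ha] using ih
    · simp [ha]

theorem pv_dropWhile_head {p : Char → Bool} :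
    ∀ (l : List Char) (c : Char) (t : List Char), l.dropWhile p = c :: t → p c = false := by
  intro l
  induction l with
  | nil => intro c t h; simp at h
  | cons a l' ih =>
    intro c t h
    by_cases ha : p a = true
    · exact ih c t (by simpa [List.dropWhile_cons, ha] using h)
    · rw [List.dropWhile_cons, if_neg (by simp [ha])] at h
      cases h
      simpa using ha

-- ---- the state machine ----
theorem pv_phase1 : ∀ (l : List Char),
    l.foldl pvG ([], 0) = (l.dropWhile PySem.Chars.isspace).foldl pvG ([], 0) := by
  intro l
  induction l with
  | nil => rfl
  | cons c t ih =>
    by_cases hc : PySem.Chars.isspace c = true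
    · rw [List.dropWhile_cons, if_pos (by simp [hc])]
      rw [List.foldl_cons, show pvG ([], 0) c = ([], 0) by simp [pvG, hc]]
      exact ih
    · rw [List.dropWhile_cons, if_neg (by simp [hc])]

theorem pv_machine : ∀ (l out : List Char), out ≠ [] → out.length ≤ 255 →
    l.foldl pvG (out, (PySem.Chars.rstrip out).length)
      = (out ++ l.take (255 - out.length),
         (PySem.Chars.rstrip (out ++ l.take (255 - out.length))).length) := by
  intro l
  induction l with
  | nil => intro out _ _; simp
  | cons c t ih =>
    intro out hne hle
    by_cases h255 : out.length = 255
    · have hstep : pvG (out, (PySem.Chars.rstrip out).length) c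
          = (out, (PySem.Chars.rstrip out).length) := by
        simp [pvG, hne, h255, List.isEmpty_iff]
      rw [List.foldl_cons, hstep, ih out hne hle]
      simp [h255]
    · have hlt : out.length < 255 := lt_of_le_of_ne hle h255
      have hstep : pvG (out, (PySem.Chars.rstrip out).length) c
          = (out ++ [c], (PySem.Chars.rstrip (out ++ [c])).length) := by
        unfold pvG
        rw [if_neg (by simp [List.isEmpty_iff, hne]), if_neg (by simp [h255])]
        by_cases hc : PySem.Chars.isspace c = true
        · rw [pv_rstrip_append_ws out [c] (by simpa using hc)]
          simp [hc]
        · rw [pv_rstrip_append_not_ws out c (by simpa using hc)]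
          simp [hc]
      rw [List.foldl_cons, hstep,
          ih (out ++ [c]) (by simp) (by simp; omega)]
      have hk : 255 - out.length = (255 - (out ++ [c]).length) + 1 := by
        simp; omega
      rw [hk, List.take_succ_cons]
      simp

theorem pv_B_chars (l : List Char) :
    (l.foldl pvG ([], 0)).1.take (l.foldl pvG ([], 0)).2
      = PySem.Chars.rstrip ((l.dropWhile PySem.Chars.isspace).take 255) := by
  rw [pv_phase1]
  cases h : l.dropWhile PySem.Chars.isspace with
  | nil => simp [PySem.Chars.rstrip]
  | cons c t =>
    have hc : PySem.Chars.isspace c = false := pv_dropWhile_head l c t h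
    have hstep : pvG ([], 0) c = ([c], (PySem.Chars.rstrip [c]).length) := by
      unfold pvG
      rw [if_neg (by simp [hc]), if_neg (by simp)]
      rw [show PySem.Chars.rstrip [c] = [c] from pv_rstrip_append_not_ws [] c hc]
      simp [hc]
    rw [List.foldl_cons, hstep, pv_machine t [c] (by simp) (by simp)]
    have ht : [c] ++ t.take (255 - ([c] : List Char).length) = (c :: t).take 255 := by
      simp [List.take_succ_cons]
    rw [ht]
    exact pv_take_rstrip_length _

-- ---- A's staged strip / truncate / strip produces the same characters ----
theorem pv_A_chars (m : List Char) :
    (if (255 : Int) < ((PySem.Chars.strip m).length : Int)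
      then PySem.Chars.strip (PySem.List.slice (PySem.Chars.strip m) none (some 255))
      else PySem.Chars.strip m)
      = PySem.Chars.rstrip ((m.dropWhile PySem.Chars.isspace).take 255) := by
  have hcast : ((255 : Int) < ((PySem.Chars.strip m).length : Int))
      ↔ 255 < (PySem.Chars.strip m).length := by exact_mod_cast Iff.rfl
  simp only [hcast]
  have hstrip : PySem.Chars.strip m
      = PySem.Chars.rstrip (m.dropWhile PySem.Chars.isspace) := by
    simp [PySem.Chars.strip, PySem.Chars.lstrip]
  cases hr : m.dropWhile PySem.Chars.isspace with
  | nil => simp [hstrip, hr, PySem.Chars.rstrip]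
  | cons c t =>
    have hc : PySem.Chars.isspace c = false := pv_dropWhile_head m c t hr
    rw [hstrip, hr]
    set r : List Char := c :: t with hrdef
    set s : List Char := PySem.Chars.rstrip r with hsdef
    have hslice : PySem.List.slice s none (some 255) = s.take 255 := by
      rw [PySem.List.slice_to s (by norm_num : (0:Int) ≤ 255)]
      simp
    have hpre : r.take s.length = s := pv_take_rstrip_length r
    by_cases hlen : 255 < s.length
    · rw [if_pos hlen, hslice]
      have h1 : s.take 255 = r.take 255 := by
        conv_lhs => rw [← hpre]
        rw [List.take_take]
        congr 1
        omega
      have h2 : PySem.Chars.strip (r.take 255) = PySem.Chars.rstrip (r.take 255) := by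
        have hcons : r.take 255 = c :: t.take 254 := by rw [hrdef]; rfl
        simp [PySem.Chars.strip, PySem.Chars.lstrip, hcons, hc]
      rw [h1, h2]
    · rw [if_neg hlen]
      have hle : s.length ≤ 255 := le_of_not_gt hlen
      have hdec : s ++ (r.reverse.takeWhile PySem.Chars.isspace).reverse = r :=
        pv_rstrip_decomp r
      have hws : ∀ x ∈ (r.reverse.takeWhile PySem.Chars.isspace).reverse,
          PySem.Chars.isspace x = true :=
        fun x hx => List.mem_takeWhile_imp (List.mem_reverse.mp hx)
      conv_rhs => rw [← hdec]
      rw [List.take_append, List.take_of_length_le hle,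
          pv_rstrip_append_ws s _ (fun x hx => hws x (List.mem_of_mem_take hx)),
          hsdef, pv_rstrip_idem]

theorem pv_core (title : String) :
    validate_page_title title = validate_page_title_alt title := by
  have hfold : title.toList.foldl pvStep ([], 0)
      = (title.toList.map pvF).foldl pvG ([], 0) := by
    rw [show pvStep = (fun st c => pvG st (pvF c)) from
          funext fun st => funext fun c => pvStep_eq st c, ← List.foldl_map]
  apply String.toList_inj.mp
  simp only [validate_page_title, validate_page_title_alt, pv_fold_replace, hfold,
    String.toList_ofList, apply_ite String.toList, PySem.Str.toList_strip,
    PySem.Str.len_eq, PySem.Str.toList_slice, PySem.Chars.slice_eq_listSlice]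
  rw [pv_B_chars]
  exact pv_A_chars (title.toList.map pvF)

-- ===== VERDICT (by name: the statement is the Claim_ definition above) =====
theorem validate_page_title_spec : Claim_equal_validate_page_title := by
  intro title _ _
  unfold Spec_validate_page_title
  exact pv_core title
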